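-- pv_equiv track=rewrite | github.com/johnsoong216/PokerOddsCalc | Hand.py | in_rank_comparison
-- ===== SOURCE A (Python) =====
-- def in_rank_comparison(hand_value_1, hand_value_2):
--
--     if hand_value_1 == [2, 3, 4, 5, 14]:
--         hand_value_1 = [1, 2, 3, 4, 5]
--     if hand_value_2 == [2, 3, 4, 5, 14]:
--         hand_value_2 = [1, 2, 3, 4, 5]
--
--     if hand_value_1 == hand_value_2:
--         return 0
--
--     for i in range(-1, -len(hand_value_1) - 1, -1):
--         if hand_value_1[i] > hand_value_2[i]:
--             return 1
--         elif hand_value_1[i] < hand_value_2[i]: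
--             return -1
-- ===== SOURCE B (Python) =====
-- def in_rank_comparison(hand_value_1, hand_value_2):
--
--     if hand_value_1 == [2, 3, 4, 5, 14]:
--         hand_value_1 = [1, 2, 3, 4, 5]
--     if hand_value_2 == [2, 3, 4, 5, 14]:
--         hand_value_2 = [1, 2, 3, 4, 5]
--
--     # Single forward pass over the back-aligned pairs, remembering the sign of
--     # the LAST difference seen -- which is the first difference from the end.
--     m = min(len(hand_value_1), len(hand_value_2))
--     result = 0
--     for a, b in zip(hand_value_1[len(hand_value_1) - m:], hand_value_2[len(hand_value_2) - m:]):
--         if a != b: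
--             result = 1 if a > b else -1
--     return result
-- ===== Notes on version B (the rewrite author's own statement) =====
-- stated objective: alternative
-- what changed: Instead of A's early-return loop over negative indices walking backwards from the end, B truncates both lists to their back-aligned common suffix and does one forward pass keeping the sign of the last difference seen (the last difference scanning forward is the first from the end).
-- outside the precondition, e.g. on in_rank_comparison([1], [2, 1]): A returns None, B returns 0; on in_rank_comparison([1, 2], [2]): A raises IndexError, B returns 0
import Mathlib
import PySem

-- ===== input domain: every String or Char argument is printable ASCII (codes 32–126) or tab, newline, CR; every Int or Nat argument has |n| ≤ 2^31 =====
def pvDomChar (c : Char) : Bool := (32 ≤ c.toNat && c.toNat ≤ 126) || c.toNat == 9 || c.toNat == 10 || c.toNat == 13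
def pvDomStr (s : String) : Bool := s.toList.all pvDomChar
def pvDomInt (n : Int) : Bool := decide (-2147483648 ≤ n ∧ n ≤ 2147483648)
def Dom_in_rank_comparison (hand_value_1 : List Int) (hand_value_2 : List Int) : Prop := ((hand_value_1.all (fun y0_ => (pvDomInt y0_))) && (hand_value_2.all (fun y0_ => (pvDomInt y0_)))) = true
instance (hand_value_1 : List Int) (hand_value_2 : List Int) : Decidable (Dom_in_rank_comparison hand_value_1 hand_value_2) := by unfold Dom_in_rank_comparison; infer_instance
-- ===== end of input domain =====

-- B replaces A's backward early-return loop over negative indices by one forward pass over the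
-- back-aligned common suffixes that keeps the sign of the LAST difference seen (alternative; same O(n) cost).

-- shared wheel normalization (the two identical guards at the top of both Pythons)
def pvNorm (h : List Int) : List Int :=
  if h = [2, 3, 4, 5, 14] then [1, 2, 3, 4, 5] else h

-- ===== PORT A =====
-- the 'for i in range(-1, -len(h1)-1, -1)' loop with its two early returns;
-- 'none' = the loop exhausted (Python returns None) or an IndexError on h2[i] — both outside Pre_
def pvLoopA (h1 h2 : List Int) : List Int → Option Int
  | [] => none
  | i :: rest =>
    match PySem.List.pyGet? h1 i, PySem.List.pyGet? h2 i with
    | some a, some b =>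
        if a > b then some 1 else if a < b then some (-1) else pvLoopA h1 h2 rest
    | _, _ => none

def in_rank_comparison (hand_value_1 : List Int) (hand_value_2 : List Int) : Int :=
  let h1 := pvNorm hand_value_1
  let h2 := pvNorm hand_value_2
  if h1 = h2 then 0
  else
    match pvLoopA h1 h2 (PySem.List.pyRange (-1) (-(h1.length : Int) - 1) (-1)) with
    | some v => v
    | none => 0   -- here Python returns None or raises IndexError; excluded by Pre_

-- ===== PORT B =====
-- Source B: m = min(len(h1), len(h2)); forward loop over zip(h1[len(h1)-m:], h2[len(h2)-m:])
-- keeping the sign of the last difference ('h[k:]' with 0 ≤ k is List.drop k).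
def in_rank_comparison_alt (hand_value_1 : List Int) (hand_value_2 : List Int) : Int :=
  let h1 := pvNorm hand_value_1
  let h2 := pvNorm hand_value_2
  let m := min h1.length h2.length
  (List.zip (h1.drop (h1.length - m)) (h2.drop (h2.length - m))).foldl
    (fun result p => if p.1 ≠ p.2 then (if p.1 > p.2 then 1 else -1) else result) 0

-- ===== PRECONDITION & SPEC =====
-- Pre_ excludes exactly the inputs where A does not return an int: the (normalized) lists are
-- unequal yet agree on all back-aligned positions within the shorter length — there A either falls
-- off the loop and returns None, or raises IndexError indexing the shorter list.
def Pre_in_rank_comparison (hand_value_1 : List Int) (hand_value_2 : List Int) : Prop :=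
  let a := pvNorm hand_value_1
  let b := pvNorm hand_value_2
  a = b ∨ a.reverse.take (min a.length b.length) ≠ b.reverse.take (min a.length b.length)
instance (hand_value_1 : List Int) (hand_value_2 : List Int) : Decidable (Pre_in_rank_comparison hand_value_1 hand_value_2) := by unfold Pre_in_rank_comparison; infer_instance

def pvWitness_in_rank_comparison : List Int × List Int := ([1, 2], [1, 3])

def Spec_in_rank_comparison (hand_value_1 : List Int) (hand_value_2 : List Int) (out : Int) : Prop := out = in_rank_comparison_alt hand_value_1 hand_value_2
instance (hand_value_1 : List Int) (hand_value_2 : List Int) (out : Int) : Decidable (Spec_in_rank_comparison hand_value_1 hand_value_2 out) := by unfold Spec_in_rank_comparison; infer_instance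

-- ===== CLAIM (what is proved, stated in full; the proofs are below) =====
def Claim_equal_in_rank_comparison : Prop := ∀ (hand_value_1 : List Int) (hand_value_2 : List Int), Dom_in_rank_comparison hand_value_1 hand_value_2 → Pre_in_rank_comparison hand_value_1 hand_value_2 → Spec_in_rank_comparison hand_value_1 hand_value_2 (in_rank_comparison hand_value_1 hand_value_2)

-- ===== LEMMAS AND PROOFS =====

-- proof-side: first nonzero comparison scanning forward (0 if none within the shared prefix)
def pvFirst : List Int → List Int → Int
  | x :: xs, y :: ys => if x > y then 1 else if x < y then -1 else pvFirst xs ys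
  | _, _ => 0

-- proof-side: sign of the last difference scanning forward (0 if none)
def pvLast : List Int → List Int → Int
  | x :: xs, y :: ys =>
      if pvLast xs ys ≠ 0 then pvLast xs ys
      else if x > y then 1 else if x < y then -1 else 0
  | _, _ => 0

-- proof-side: A's loop body as a recursion over the two reversed lists
def pvOptCmp : List Int → List Int → Option Int
  | x :: xs, y :: ys =>
      if x > y then some 1 else if x < y then some (-1) else pvOptCmp xs ys
  | _, _ => none

theorem pvLast_self (l : List Int) : pvLast l l = 0 := by
  induction l with
  | nil => rfl
  | cons x xs ih => simp [pvLast, ih]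

theorem foldl_eq_pvLast (l1 : List Int) : ∀ (l2 : List Int) (acc : Int),
    (List.zip l1 l2).foldl
      (fun result p => if p.1 ≠ p.2 then (if p.1 > p.2 then 1 else -1) else result) acc
    = if pvLast l1 l2 = 0 then acc else pvLast l1 l2 := by
  induction l1 with
  | nil => intro l2 acc; simp [pvLast]
  | cons x xs ih =>
    intro l2 acc
    cases l2 with
    | nil => simp [pvLast]
    | cons y ys =>
      simp only [List.zip_cons_cons, List.foldl_cons, ih]
      by_cases h0 : pvLast xs ys = 0
      · by_cases hxy : x = y
        · subst hxy; simp [pvLast, h0]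
        · rcases lt_or_gt_of_ne hxy with hlt | hgt
          · simp [pvLast, h0, hxy, hlt, not_lt.mpr (le_of_lt hlt)]
          · simp [pvLast, h0, hxy, hgt]
      · simp [pvLast, h0]

theorem pvFirst_append (r1 : List Int) : ∀ (r2 : List Int) (x y : Int),
    r1.length = r2.length →
    pvFirst (r1 ++ [x]) (r2 ++ [y])
      = if pvFirst r1 r2 = 0 then (if x > y then 1 else if x < y then -1 else 0)
        else pvFirst r1 r2 := by
  induction r1 with
  | nil =>
    intro r2 x y h
    cases r2 with
    | nil => simp [pvFirst]
    | cons _ _ => simp at h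
  | cons a as ih =>
    intro r2 x y h
    cases r2 with
    | nil => simp at h
    | cons b bs =>
      simp only [List.length_cons, Nat.succ.injEq] at h
      by_cases hab : a = b
      · subst hab
        simp only [List.cons_append, pvFirst, lt_irrefl, if_false, ih bs x y h]
      · rcases lt_or_gt_of_ne hab with hlt | hgt
        · simp [pvFirst, hlt, not_lt.mpr (le_of_lt hlt)]
        · simp [pvFirst, hgt]

theorem pvLast_eq_pvFirst_reverse (l1 : List Int) : ∀ (l2 : List Int),
    l1.length = l2.length → pvLast l1 l2 = pvFirst l1.reverse l2.reverse := by
  induction l1 with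
  | nil =>
    intro l2 h
    cases l2 with
    | nil => rfl
    | cons _ _ => simp at h
  | cons x xs ih =>
    intro l2 h
    cases l2 with
    | nil => simp at h
    | cons y ys =>
      simp only [List.length_cons, Nat.succ.injEq] at h
      have hlen : xs.reverse.length = ys.reverse.length := by simp [h]
      simp only [List.reverse_cons, pvFirst_append _ _ x y hlen, pvLast, ← ih ys h]
      by_cases h0 : pvLast xs ys = 0
      · simp [h0]
      · simp [h0]

theorem pvOptCmp_of_take_ne (r1 : List Int) : ∀ (r2 : List Int),
    r1.take (min r1.length r2.length) ≠ r2.take (min r1.length r2.length) →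
    pvOptCmp r1 r2
      = some (pvFirst (r1.take (min r1.length r2.length)) (r2.take (min r1.length r2.length))) := by
  induction r1 with
  | nil => intro r2 h; simp at h
  | cons x xs ih =>
    intro r2 h
    cases r2 with
    | nil => simp at h
    | cons y ys =>
      by_cases hxy : x = y
      · subst hxy
        simp only [List.length_cons, Nat.succ_min_succ, List.take_succ_cons, pvOptCmp, pvFirst,
          lt_irrefl, if_false] at h ⊢
        rw [ih ys (by intro he; exact h (by rw [he]))]
      · rcases lt_or_gt_of_ne hxy with hlt | hgt
        · simp [pvOptCmp, pvFirst, Nat.succ_min_succ, hlt, not_lt.mpr (le_of_lt hlt)]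
        · simp [pvOptCmp, pvFirst, Nat.succ_min_succ, hgt]

theorem pvLoopA_eq_optCmp (t : List Int) : ∀ (a b : List Int) (j : ℕ), 1 ≤ j →
    a.reverse.drop (j - 1) = t →
    ∀ v, pvOptCmp t (b.reverse.drop (j - 1)) = some v →
    pvLoopA a b (PySem.List.pyRange (-(j : Int)) (-(a.length : Int) - 1) (-1)) = some v := by
  induction t with
  | nil => intro a b j _ _ v hv; simp [pvOptCmp] at hv
  | cons x t' ih =>
    intro a b j hj hdrop v hv
    have hjlen : j - 1 < a.reverse.length := by
      by_contra hge
      rw [List.drop_eq_nil_of_le (le_of_not_gt hge)] at hdrop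
      simp at hdrop
    rw [List.length_reverse] at hjlen
    cases hb : b.reverse.drop (j - 1) with
    | nil => rw [hb] at hv; simp [pvOptCmp] at hv
    | cons y s =>
      have hjb : j - 1 < b.reverse.length := by
        by_contra hge
        rw [List.drop_eq_nil_of_le (le_of_not_gt hge)] at hb
        simp at hb
      rw [List.length_reverse] at hjb
      have hj1 : j - 1 + 1 = j := by omega
      have hda := List.drop_eq_getElem_cons (l := a.reverse) (i := j - 1) (by simpa using hjlen)
      rw [hdrop] at hda
      have hxa : x = a.reverse[j - 1]'(by simpa using hjlen) :=
        ((List.cons.injEq ..).mp hda).1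
      have hta : a.reverse.drop j = t' := by
        have h2 := ((List.cons.injEq ..).mp hda).2
        rw [hj1] at h2; exact h2.symm
      have hdb := List.drop_eq_getElem_cons (l := b.reverse) (i := j - 1) (by simpa using hjb)
      rw [hb] at hdb
      have hya : y = b.reverse[j - 1]'(by simpa using hjb) :=
        ((List.cons.injEq ..).mp hdb).1
      have htb : b.reverse.drop j = s := by
        have h2 := ((List.cons.injEq ..).mp hdb).2
        rw [hj1] at h2; exact h2.symm
      have hstep : PySem.List.pyRange (-(j : Int)) (-(a.length : Int) - 1) (-1)
          = -(j : Int) :: PySem.List.pyRange (-(j : Int) - 1) (-(a.length : Int) - 1) (-1) := by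
        apply PySem.List.pyRange_neg_one_cons
        omega
      have hga : PySem.List.pyGet? a (-(j : Int)) = some (a[a.length - j]'(by omega)) := by
        rw [PySem.List.pyGet?_neg_natCast a j (by omega) (by omega)]
        exact List.getElem?_eq_getElem (by omega)
      have hgb : PySem.List.pyGet? b (-(j : Int)) = some (b[b.length - j]'(by omega)) := by
        rw [PySem.List.pyGet?_neg_natCast b j (by omega) (by omega)]
        exact List.getElem?_eq_getElem (by omega)
      have hxa' : x = a[a.length - j]'(by omega) := by
        rw [hxa, List.getElem_reverse]; congr 1; omega
      have hya' : y = b[b.length - j]'(by omega) := by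
        rw [hya, List.getElem_reverse]; congr 1; omega
      rw [hstep]
      simp only [pvLoopA, hga, hgb, ← hxa', ← hya']
      rw [hb] at hv
      simp only [pvOptCmp] at hv
      by_cases h1 : x > y
      · simp [h1] at hv ⊢; exact hv
      · by_cases h2 : x < y
        · simp [h1, h2] at hv ⊢; exact hv
        · simp only [h1, if_false, h2] at hv ⊢
          have harg : -(j : Int) - 1 = -((j + 1 : ℕ) : Int) := by push_cast; ring
          rw [harg]
          apply ih a b (j + 1) (by omega)
          · simpa using hta
          · simpa [htb] using hv

theorem pvFirst_ne_zero (r1 : List Int) : ∀ (r2 : List Int),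
    r1.length = r2.length → r1 ≠ r2 → pvFirst r1 r2 ≠ 0 := by
  induction r1 with
  | nil =>
    intro r2 h hne
    cases r2 with
    | nil => exact absurd rfl hne
    | cons _ _ => simp at h
  | cons x xs ih =>
    intro r2 h hne
    cases r2 with
    | nil => simp at h
    | cons y ys =>
      simp only [List.length_cons, Nat.succ.injEq] at h
      by_cases hxy : x = y
      · subst hxy
        simp only [pvFirst, lt_irrefl, if_false]
        exact ih ys h (fun he => hne (by rw [he]))
      · rcases lt_or_gt_of_ne hxy with hlt | hgt
        · simp [pvFirst, hlt, not_lt.mpr (le_of_lt hlt)]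
        · simp [pvFirst, hgt]

theorem in_rank_comparison_spec : Claim_equal_in_rank_comparison := by
  intro h1 h2 _ hpre
  unfold Spec_in_rank_comparison in_rank_comparison in_rank_comparison_alt
  simp only []
  set a := pvNorm h1 with ha
  set b := pvNorm h2 with hb
  unfold Pre_in_rank_comparison at hpre
  rw [← ha, ← hb] at hpre
  set m := min a.length b.length with hm
  have hma : m ≤ a.length := by omega
  have hmb : m ≤ b.length := by omega
  have hta : (a.drop (a.length - m)).length = m := by simp; omega
  have htb : (b.drop (b.length - m)).length = m := by simp; omega
  have hrevA : (a.drop (a.length - m)).reverse = a.reverse.take m := by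
    rw [List.reverse_drop]; congr 1; omega
  have hrevB : (b.drop (b.length - m)).reverse = b.reverse.take m := by
    rw [List.reverse_drop]; congr 1; omega
  -- B's fold = sign of last difference
  have hBval : (List.zip (a.drop (a.length - m)) (b.drop (b.length - m))).foldl
      (fun result p => if p.1 ≠ p.2 then (if p.1 > p.2 then 1 else -1) else result) 0
      = if pvLast (a.drop (a.length - m)) (b.drop (b.length - m)) = 0 then 0
        else pvLast (a.drop (a.length - m)) (b.drop (b.length - m)) :=
    foldl_eq_pvLast _ _ _
  by_cases heq : a = b
  · have hdrop : a.drop (a.length - m) = b.drop (b.length - m) := by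
      rw [heq]
    rw [hBval, hdrop, if_pos heq, if_pos (pvLast_self _)]
  · have hm' : a.reverse.take m ≠ b.reverse.take m := by
      rcases hpre with h | h
      · exact absurd h heq
      · exact h
    have hminrev : min a.reverse.length b.reverse.length = m := by simp [hm]
    have htake : a.reverse.take (min a.reverse.length b.reverse.length)
        ≠ b.reverse.take (min a.reverse.length b.reverse.length) := by
      rw [hminrev]; exact hm'
    have hopt := pvOptCmp_of_take_ne a.reverse b.reverse htake
    rw [hminrev] at hopt
    have hloop := pvLoopA_eq_optCmp a.reverse a b 1 (le_refl 1) (by simp)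
      (pvFirst (a.reverse.take m) (b.reverse.take m)) (by simpa using hopt)
    have hone : (-(1 : ℕ) : Int) = -1 := by norm_num
    rw [hone] at hloop
    have hBfirst : pvLast (a.drop (a.length - m)) (b.drop (b.length - m))
        = pvFirst (a.reverse.take m) (b.reverse.take m) := by
      rw [pvLast_eq_pvFirst_reverse _ _ (by rw [hta, htb]), hrevA, hrevB]
    have hB0 : pvFirst (a.reverse.take m) (b.reverse.take m) ≠ 0 := by
      apply pvFirst_ne_zero
      · simp; omega
      · exact hm'
    rw [hBval, hBfirst, if_neg hB0, if_neg heq]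
    simp only [hloop]
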